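-- pv_equiv track=rewrite | github.com/NVlabs/RoboLab | robolab/tasks/_utils/compute_task_statistics.py | filter_by_subfolders
-- ===== SOURCE A (Python) =====
-- from collections import Counter, defaultdict
-- from typing import Any, Dict, List, Tuple
--
-- def filter_by_subfolders(tasks_data: List[Dict[str, Any]], subfolders: List[str] = None) -> List[Dict[str, Any]]:
--     """Filter tasks to only include those in the specified subfolders."""
--     if subfolders is None:
--         return tasks_data
--     subfolder_to_tasks = sort_tasks_by_subfolder(tasks_data)
--     filtered = []
--     for folder in subfolders:
--         filtered.extend(subfolder_to_tasks.get(folder, []))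
--     return filtered
--
-- def sort_tasks_by_subfolder(tasks_data: List[Dict[str, Any]]) -> Dict[str, List[Dict[str, Any]]]:
--     """Generate a dictionary of subfolder names to tasks."""
--     subfolder_to_tasks = defaultdict(list)
--     for task in tasks_data:
--         subfolder = task.get('subfolder', '')
--         subfolder_to_tasks[subfolder].append(task)
--     return dict(subfolder_to_tasks)
-- ===== SOURCE B (Python) =====
-- from typing import Any, Dict, List
--
-- def filter_by_subfolders(tasks_data: List[Dict[str, Any]], subfolders: List[str] = None) -> List[Dict[str, Any]]:
--     """Filter tasks to only include those in the specified subfolders."""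
--     if subfolders is None:
--         return tasks_data
--     return [task for folder in subfolders
--             for task in tasks_data
--             if task.get('subfolder', '') == folder]
-- ===== Notes on version B (the rewrite author's own statement) =====
-- stated objective: simpler
-- what changed: Replaces the build-a-subfolder-to-tasks-dict-then-lookup pipeline (and its helper) with a single comprehension that, for each requested folder, scans tasks_data and keeps tasks whose subfolder matches.
import Mathlib
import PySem

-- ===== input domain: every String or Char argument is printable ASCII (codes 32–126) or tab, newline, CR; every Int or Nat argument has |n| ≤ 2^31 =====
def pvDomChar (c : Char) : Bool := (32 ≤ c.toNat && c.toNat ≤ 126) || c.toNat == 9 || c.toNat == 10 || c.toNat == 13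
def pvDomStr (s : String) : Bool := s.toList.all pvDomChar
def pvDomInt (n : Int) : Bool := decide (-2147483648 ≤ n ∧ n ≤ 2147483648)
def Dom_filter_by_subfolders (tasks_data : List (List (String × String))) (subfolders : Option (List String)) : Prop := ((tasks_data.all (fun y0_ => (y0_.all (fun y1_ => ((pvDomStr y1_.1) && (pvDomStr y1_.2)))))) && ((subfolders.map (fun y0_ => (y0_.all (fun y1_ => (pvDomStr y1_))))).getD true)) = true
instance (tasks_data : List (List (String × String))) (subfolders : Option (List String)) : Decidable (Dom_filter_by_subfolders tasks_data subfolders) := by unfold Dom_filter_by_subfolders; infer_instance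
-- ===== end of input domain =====

-- B replaces A's dict-grouping helper with a single comprehension scanning tasks_data per requested folder: simpler, no helper (return value only; both return tasks_data itself when subfolders is None).

-- ===== PORT A =====
-- task.get('subfolder', '')
def pvSubfolderOf (task : List (String × String)) : String :=
  (PySem.Dict.mk task).getD "subfolder" ""

-- helper sort_tasks_by_subfolder: defaultdict(list) grouping loop
def sort_tasks_by_subfolder (tasks_data : List (List (String × String))) :
    PySem.Dict String (List (List (String × String))) :=
  tasks_data.foldl (fun d task => d.modify (pvSubfolderOf task) [] (· ++ [task])) PySem.Dict.empty

def filter_by_subfolders (tasks_data : List (List (String × String))) (subfolders : Option (List String)) : List (List (String × String)) :=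
  match subfolders with
  | none => tasks_data
  | some subs =>
    let subfolder_to_tasks := sort_tasks_by_subfolder tasks_data
    subs.foldl (fun filtered folder => filtered ++ subfolder_to_tasks.getD folder []) []

-- ===== PORT B =====
def filter_by_subfolders_alt (tasks_data : List (List (String × String))) (subfolders : Option (List String)) : List (List (String × String)) :=
  match subfolders with
  | none => tasks_data
  | some subs =>
    subs.flatMap (fun folder =>
      tasks_data.filter (fun task => (PySem.Dict.mk task).getD "subfolder" "" == folder))

-- ===== PRECONDITION & SPEC =====
def Spec_filter_by_subfolders (tasks_data : List (List (String × String))) (subfolders : Option (List String)) (out : List (List (String × String))) : Prop := out = filter_by_subfolders_alt tasks_data subfolders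
instance (tasks_data : List (List (String × String))) (subfolders : Option (List String)) (out : List (List (String × String))) : Decidable (Spec_filter_by_subfolders tasks_data subfolders out) := by unfold Spec_filter_by_subfolders; infer_instance

-- ===== CLAIM (what is proved, stated in full; the proofs are below) =====
def Claim_equal_filter_by_subfolders : Prop := ∀ (tasks_data : List (List (String × String))) (subfolders : Option (List String)), Dom_filter_by_subfolders tasks_data subfolders → Spec_filter_by_subfolders tasks_data subfolders (filter_by_subfolders tasks_data subfolders)

-- ===== LEMMAS AND PROOFS =====

-- A's grouping loop, looked up at a folder, is exactly the filter of the input by that folder.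
theorem getD_group_loop (l : List (List (String × String)))
    (d : PySem.Dict String (List (List (String × String)))) (c : String) :
    (l.foldl (fun d task => d.modify (pvSubfolderOf task) [] (· ++ [task])) d).getD c []
      = d.getD c [] ++ l.filter (fun task => pvSubfolderOf task == c) := by
  induction l generalizing d with
  | nil => simp
  | cons t rest ih =>
    simp only [List.foldl_cons, List.filter_cons, ih,
      PySem.Dict.getD_modify]
    by_cases h : c = pvSubfolderOf t
    · subst h; simp
    · have : (pvSubfolderOf t == c) = false := by
        simp only [beq_eq_false_iff_ne, ne_eq]; exact fun e => h e.symm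
      simp [h, this]

theorem filter_by_subfolders_spec : Claim_equal_filter_by_subfolders := by
  intro tasks_data subfolders _
  unfold Spec_filter_by_subfolders filter_by_subfolders filter_by_subfolders_alt
  cases subfolders with
  | none => rfl
  | some subs =>
    simp only
    rw [PySem.List.foldl_append_eq_flatMap]
    refine List.flatMap_congr ?_
    intro f _
    rw [sort_tasks_by_subfolder, getD_group_loop]
    simp [pvSubfolderOf]
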